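-- pv_equiv track=rewrite | github.com/Doorcreator/Bookshelf | testfd/ALG006 rotate str.py | rotate_str
-- ===== SOURCE A (Python) =====
-- def rotate_str(n,i,j):
-- 	i+=1
-- 	if i>=j:
-- 		n = n[1:]+n[0]
-- 		return n
-- 	else:
-- 		n = n[1:]+n[0]
-- 		return rotate_str(n,i,j)
-- ===== SOURCE B (Python) =====
-- def rotate_str(n, i, j):
--     for _ in range(max(1, j - i)):
--         n = n[1:] + n[0]
--     return n
-- ===== Notes on version B (the rewrite author's own statement) =====
-- stated objective: simpler
-- what changed: Replaces A's tail recursion (which mutates i until i>=j) by an explicit loop running exactly max(1, j-i) per-character rotations.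
import Mathlib
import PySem

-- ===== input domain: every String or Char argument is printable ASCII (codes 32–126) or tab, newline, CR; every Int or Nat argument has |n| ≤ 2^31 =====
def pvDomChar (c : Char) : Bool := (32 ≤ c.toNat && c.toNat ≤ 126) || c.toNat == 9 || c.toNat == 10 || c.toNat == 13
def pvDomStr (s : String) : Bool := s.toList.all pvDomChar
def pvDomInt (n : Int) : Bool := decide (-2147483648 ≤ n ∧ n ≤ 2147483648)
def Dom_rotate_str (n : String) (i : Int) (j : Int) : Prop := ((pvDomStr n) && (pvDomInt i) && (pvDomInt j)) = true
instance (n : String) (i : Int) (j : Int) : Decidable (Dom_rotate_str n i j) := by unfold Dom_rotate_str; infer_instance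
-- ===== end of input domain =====

-- B replaces A's tail recursion by an explicit loop running max(1, j-i) per-character rotations; objective: simpler.


-- ===== PORT A =====
-- n[1:] + n[0]  (exact via PySem.List.slice; n[0] on a non-empty string is its head = take 1;
-- the empty string, where Python raises IndexError, is excluded by Pre_ below)
def pvRotA (n : String) : String :=
  String.mk (PySem.List.slice n.toList (some 1) none ++ n.toList.take 1)

def rotate_str (n : String) (i : Int) (j : Int) : String :=
  if i + 1 ≥ j then
    pvRotA n
  else
    rotate_str (pvRotA n) (i + 1) j
termination_by (j - i).toNat
decreasing_by omega

-- ===== PORT B =====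
-- n[1:] + n[0], the identical per-character rotation body of Source B's loop
def pvRotB (n : String) : String :=
  String.mk (PySem.List.slice n.toList (some 1) none ++ n.toList.take 1)

def rotate_str_alt (n : String) (i : Int) (j : Int) : String :=
  (PySem.List.pyRange 0 (max 1 (j - i)) 1).foldl (fun acc _ => pvRotB acc) n

-- ===== PRECONDITION & SPEC =====
-- Pre_ excludes the empty string, on which Python A raises IndexError at n[0] (so does B).
def Pre_rotate_str (n : String) (i : Int) (j : Int) : Prop := n ≠ ""
instance (n : String) (i : Int) (j : Int) : Decidable (Pre_rotate_str n i j) := by unfold Pre_rotate_str; infer_instance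

def pvWitness_rotate_str : String × Int × Int := ("abc", 0, 2)

def Spec_rotate_str (n : String) (i : Int) (j : Int) (out : String) : Prop := out = rotate_str_alt n i j
instance (n : String) (i : Int) (j : Int) (out : String) : Decidable (Spec_rotate_str n i j out) := by unfold Spec_rotate_str; infer_instance

-- ===== CLAIM (what is proved, stated in full; the proofs are below) =====
def Claim_equal_rotate_str : Prop := ∀ (n : String) (i : Int) (j : Int), Dom_rotate_str n i j → Pre_rotate_str n i j → Spec_rotate_str n i j (rotate_str n i j)

-- ===== LEMMAS AND PROOFS =====

-- both rotation bodies are the same function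
theorem pvRotB_eq_pvRotA : pvRotB = pvRotA := rfl

-- A iterates the rotation (j - i - 1).toNat + 1 times
theorem rotate_str_eq_iterate (k : Nat) : ∀ (n : String) (i j : Int),
    (j - i - 1).toNat = k → rotate_str n i j = pvRotA^[k + 1] n := by
  induction k with
  | zero =>
    intro n i j h
    rw [rotate_str, if_pos (by omega), Function.iterate_one]
  | succ k ih =>
    intro n i j h
    rw [rotate_str, if_neg (by omega), ih (pvRotA n) (i + 1) j (by omega),
      ← Function.iterate_succ_apply]

-- a foldl whose body ignores the list element is an iterate
theorem foldl_const_iterate {α : Type} (f : String → String) :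
    ∀ (l : List α) (x : String), l.foldl (fun a _ => f a) x = f^[l.length] x := by
  intro l
  induction l with
  | nil => intro x; rfl
  | cons h t ih =>
    intro x
    simp only [List.foldl_cons, List.length_cons, ih, Function.iterate_succ_apply]

theorem rotate_str_alt_eq_iterate (n : String) (i j : Int) :
    rotate_str_alt n i j = pvRotA^[(j - i - 1).toNat + 1] n := by
  rw [rotate_str_alt, pvRotB_eq_pvRotA, foldl_const_iterate,
    PySem.List.length_pyRange_one]
  congr 1
  omega

-- ===== VERDICT (by name: the statement is the Claim_ definition above) =====
theorem rotate_str_spec : Claim_equal_rotate_str := by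
  intro n i j _ _
  unfold Spec_rotate_str
  rw [rotate_str_alt_eq_iterate, rotate_str_eq_iterate (j - i - 1).toNat n i j rfl]
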